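-- pv_equiv track=rewrite | github.com/se-lex/sfs-processor | utils/table_converter.py | normalize_table_rows
-- ===== SOURCE A (Python) =====
-- from typing import List, Tuple, Optional
--
-- def normalize_table_rows(rows: List[List[str]]) -> List[List[str]]:
--     """
--     Normalize table rows to have the same number of columns and remove empty columns.
--
--     Args:
--         rows: List of rows, where each row is a list of columns
--
--     Returns:
--         Normalized rows with consistent column count and empty columns removed
--     """
--     if not rows:
--         return rows
--
--     # Find the maximum number of columns
--     max_cols = max(len(row) for row in rows)
--
--     # Pad rows with empty strings first
--     padded_rows = []
--     for row in rows:
--         padded_row = row.copy()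
--         while len(padded_row) < max_cols:
--             padded_row.append('')
--         padded_rows.append(padded_row)
--
--     # Identify columns that are entirely empty
--     empty_columns = set()
--     for col_idx in range(max_cols):
--         if all(not row[col_idx].strip() for row in padded_rows):
--             empty_columns.add(col_idx)
--
--     # Remove empty columns
--     if empty_columns:
--         normalized_rows = []
--         for row in padded_rows:
--             filtered_row = [col for i, col in enumerate(row) if i not in empty_columns]
--             normalized_rows.append(filtered_row)
--         return normalized_rows
--
--     return padded_rows
-- ===== SOURCE B (Python) =====
-- def normalize_table_rows(rows):
--     """Column-major re-implementation: transpose the table into padded columns,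
--     keep the columns with any non-blank cell, and transpose back."""
--     if not rows:
--         return rows
--     width = max(map(len, rows))
--     cols = [[row[i] if i < len(row) else '' for row in rows] for i in range(width)]
--     kept = [c for c in cols if any(cell.strip() for cell in c)]
--     return [list(t) for t in zip(*kept)] if kept else [[] for _ in rows]
-- ===== Notes on version B (the rewrite author's own statement) =====
-- stated objective: alternative
-- what changed: B works column-major: it transposes the table into padded columns, filters out all-blank columns as whole column lists, and transposes back with zip, instead of A's row-major pad-every-row, collect an empty-column index set, then filter each padded row by index.
import Mathlib
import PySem

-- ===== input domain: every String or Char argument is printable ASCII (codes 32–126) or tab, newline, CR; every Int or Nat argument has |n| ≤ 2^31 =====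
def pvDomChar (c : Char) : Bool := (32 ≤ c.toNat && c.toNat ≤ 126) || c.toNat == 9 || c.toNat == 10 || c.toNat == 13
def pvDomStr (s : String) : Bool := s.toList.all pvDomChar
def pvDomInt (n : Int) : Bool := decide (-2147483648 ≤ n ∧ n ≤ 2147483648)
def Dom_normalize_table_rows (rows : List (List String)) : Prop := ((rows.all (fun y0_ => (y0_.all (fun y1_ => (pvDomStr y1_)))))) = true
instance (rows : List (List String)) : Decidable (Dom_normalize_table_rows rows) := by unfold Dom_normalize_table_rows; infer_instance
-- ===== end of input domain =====

-- B works column-major (transpose into padded columns, filter blank columns, zip back)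
-- instead of A's row-major pad / empty-column-set / per-row filter; same return value.

-- ===== PORT A =====
-- 'while len(padded_row) < max_cols: padded_row.append('')' — the guard is re-checked each
-- iteration; the fuel is the exact number of iterations the loop performs, so this is the same loop
def pvPadGo (m : Int) (fuel : Nat) (row : List String) : List String :=
  match fuel with
  | 0 => row
  | n + 1 => if (row.length : Int) < m then pvPadGo m n (row ++ [""]) else row

def pvPad (row : List String) (m : Int) : List String :=
  pvPadGo m (m - row.length).toNat row

def normalize_table_rows (rows : List (List String)) : List (List String) :=
  if rows = [] then rows
  else
    let max_cols : Int := (PySem.List.max? (rows.map (fun r => (r.length : Int))) (fun x => x)).getD 0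
    let padded := rows.map (fun row => pvPad row max_cols)
    -- row[col_idx] is always in range on the padded rows, so pyGetD with default "" is exact here
    let empty_columns : PySem.Set Int :=
      (PySem.List.pyRange 0 max_cols 1).foldl
        (fun s col =>
          if padded.all (fun row => PySem.Str.strip (PySem.List.pyGetD row col "") == "") then
            PySem.Set.add s col
          else s)
        PySem.Set.empty
    if empty_columns ≠ [] then
      padded.map (fun row =>
        ((PySem.List.enumerate row 0).filter
          (fun p => !(PySem.Set.contains empty_columns p.1))).map (·.2))
    else padded

-- ===== PORT B =====
-- hand-written port of Python's zip(*(c :: cs)): stop as soon as any list is exhausted;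
-- structural recursion on the first list (exact: zip stops at the shortest argument)
def pvZipGo : List String → List (List String) → List (List String)
  | [], _ => []
  | x :: xs, cs =>
    if cs.any (fun l => l.isEmpty) then []
    else (x :: cs.map (fun l => l.headD "")) :: pvZipGo xs (cs.map List.tail)

def normalize_table_rows_alt (rows : List (List String)) : List (List String) :=
  if rows = [] then rows
  else
    let width : Int := (PySem.List.max? (rows.map (fun r => (r.length : Int))) (fun x => x)).getD 0
    let cols := (PySem.List.pyRange 0 width 1).map
      (fun i => rows.map (fun row =>
        if i < (row.length : Int) then PySem.List.pyGetD row i "" else ""))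
    let kept := cols.filter (fun c => c.any (fun cell => !(PySem.Str.strip cell == "")))
    match kept with
    | [] => rows.map (fun _ => ([] : List String))
    | c :: cs => pvZipGo c cs

-- ===== PRECONDITION & SPEC =====
def Spec_normalize_table_rows (rows : List (List String)) (out : List (List String)) : Prop := out = normalize_table_rows_alt rows
instance (rows : List (List String)) (out : List (List String)) : Decidable (Spec_normalize_table_rows rows out) := by unfold Spec_normalize_table_rows; infer_instance

-- ===== CLAIM (what is proved, stated in full; the proofs are below) =====
def Claim_equal_normalize_table_rows : Prop := ∀ (rows : List (List String)), Dom_normalize_table_rows rows → Spec_normalize_table_rows rows (normalize_table_rows rows)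

-- ===== LEMMAS AND PROOFS =====

-- both sides are proved equal to this index form: pick the kept column indices, emit rows by indexing
def pvCell (row : List String) (i : Int) : String :=
  if i < (row.length : Int) then PySem.List.pyGetD row i "" else ""

def pvIdxForm (rows : List (List String)) : List (List String) :=
  if rows = [] then rows
  else
    let m : Int := (PySem.List.max? (rows.map (fun r => (r.length : Int))) (fun x => x)).getD 0
    let keep := (PySem.List.pyRange 0 m 1).filter
      (fun i => rows.any (fun row =>
        if i < (row.length : Int) then !(PySem.Str.strip (PySem.List.pyGetD row i "") == "") else false))
    rows.map (fun row => keep.map (fun i => pvCell row i))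

-- the while loop in closed form
theorem pvPadGo_eq (m : Int) (fuel : Nat) (row : List String)
    (hf : m - (row.length : Int) ≤ (fuel : Int)) :
    pvPadGo m fuel row = row ++ List.replicate ((m - (row.length : Int)).toNat) "" := by
  induction fuel generalizing row with
  | zero =>
    have h0 : (m - (row.length : Int)).toNat = 0 := by omega
    simp [pvPadGo, h0]
  | succ n ih =>
    rw [pvPadGo]
    by_cases h : (row.length : Int) < m
    · rw [if_pos h, ih (row ++ [""]) (by simp; omega)]
      have h1 : (m - ((row ++ [""]).length : Int)).toNat + 1 = (m - (row.length : Int)).toNat := by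
        simp; omega
      rw [List.append_assoc]
      congr 1
      rw [← h1]
      simp [List.replicate_succ]
    · rw [if_neg h]
      have h0 : (m - (row.length : Int)).toNat = 0 := by omega
      simp [h0]

theorem pvPad_eq (row : List String) (m : Int) :
    pvPad row m = row ++ List.replicate ((m - (row.length : Int)).toNat) "" :=
  pvPadGo_eq m _ row (by omega)

-- the padded row as an indexing map over range(max_cols)
theorem pvPad_eq_map (row : List String) (m : Int) (hle : (row.length : Int) ≤ m) :
    pvPad row m = (PySem.List.pyRange 0 m 1).map (fun i => pvCell row i) := by
  rw [pvPad_eq, PySem.List.pyRange_one, List.map_map]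
  apply List.ext_getElem
  · simp; omega
  · intro k hk1 hk2
    simp only [List.getElem_map, List.getElem_range, Function.comp_apply, zero_add, pvCell]
    by_cases hk : k < row.length
    · rw [List.getElem_append_left hk, if_pos (by exact_mod_cast hk),
          PySem.List.pyGetD_natCast, List.getD_eq_getElem row "" hk]
    · rw [List.getElem_append_right (by omega), if_neg (by omega)]
      simp

theorem length_pvPad (row : List String) (m : Int) (hle : (row.length : Int) ≤ m) :
    ((pvPad row m).length : Int) = m := by
  rw [pvPad_eq]; simp; omega

theorem pyGetD_pvPad (row : List String) (m i : Int) (hle : (row.length : Int) ≤ m)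
    (h0 : 0 ≤ i) (hi : i < m) :
    PySem.List.pyGetD (pvPad row m) i "" = pvCell row i := by
  rw [pvPad_eq_map row m hle]
  exact PySem.List.pyGetD_map_pyRange_of_nonneg _ _ _ _ h0 hi

-- fold of Set.add over a nodup list, guarded by a predicate, is a filter
theorem foldl_add_filter (l : List Int) (p : Int → Bool) (s : List Int)
    (hnd : l.Nodup) (hdis : ∀ x ∈ l, x ∉ s) :
    l.foldl (fun s c => if p c then PySem.Set.add s c else s) s = s ++ l.filter p := by
  induction l generalizing s with
  | nil => simp
  | cons c t ih =>
    rw [List.nodup_cons] at hnd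
    rw [List.foldl_cons, List.filter_cons]
    by_cases hp : p c
    · rw [if_pos hp, if_pos hp, PySem.Set.add_of_not_mem (hdis c (List.mem_cons_self))]
      rw [ih (s ++ [c]) hnd.2 (by
        intro x hx
        simp only [List.mem_append, List.mem_singleton]
        exact fun hc => hc.elim (fun hxs => hdis x (List.mem_cons_of_mem _ hx) hxs)
          (fun hxc => hnd.1 (hxc ▸ hx)))]
      simp
    · rw [if_neg hp, if_neg hp, ih s hnd.2 (fun x hx => hdis x (List.mem_cons_of_mem _ hx))]

theorem all_not_eq_not_any {α : Type} (l : List α) (f : α → Bool) :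
    l.all (fun x => !f x) = !(l.any f) := by
  induction l with
  | nil => rfl
  | cons a t ih => simp [ih]

theorem all_congr' {α : Type} (l : List α) (f g : α → Bool) (h : ∀ x ∈ l, f x = g x) :
    l.all f = l.all g := by
  induction l with
  | nil => rfl
  | cons a t ih =>
    simp only [List.all_cons]
    rw [h a List.mem_cons_self, ih (fun x hx => h x (List.mem_cons_of_mem _ hx))]

theorem any_congr' {α : Type} (l : List α) (f g : α → Bool) (h : ∀ x ∈ l, f x = g x) :
    l.any f = l.any g := by
  induction l with
  | nil => rfl
  | cons a t ih =>
    simp only [List.any_cons]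
    rw [h a List.mem_cons_self, ih (fun x hx => h x (List.mem_cons_of_mem _ hx))]

-- the per-cell emptiness tests of A (on the padded row) and the index form are complementary
theorem cell_test (rows : List (List String)) (m i : Int)
    (hle : ∀ row ∈ rows, (row.length : Int) ≤ m) (h0 : 0 ≤ i) (hi : i < m) :
    ((rows.map (fun row => pvPad row m)).all
        (fun row => PySem.Str.strip (PySem.List.pyGetD row i "") == ""))
    = !(rows.any (fun row =>
        if i < (row.length : Int) then !(PySem.Str.strip (PySem.List.pyGetD row i "") == "") else false)) := by
  rw [List.all_map, ← all_not_eq_not_any]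
  apply all_congr'
  intro row hr
  simp only [Function.comp_apply]
  rw [pyGetD_pvPad row m i (hle row hr) h0 hi]
  unfold pvCell
  split_ifs with hlt
  · simp
  · decide

-- A equals the index form
theorem A_eq_idx (rows : List (List String)) : normalize_table_rows rows = pvIdxForm rows := by
  unfold normalize_table_rows pvIdxForm
  by_cases h : rows = []
  · simp [h]
  · rw [if_neg h, if_neg h]
    obtain ⟨m, hm⟩ : ∃ m, PySem.List.max? (rows.map (fun r => ((r.length : Int)))) (fun x => x) = some m := by
      cases hmx : PySem.List.max? (rows.map (fun r => ((r.length : Int)))) (fun x => x) with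
      | none => exact absurd ((PySem.List.max?_eq_none_iff _ _).mp hmx) (by simpa using h)
      | some m => exact ⟨m, rfl⟩
    simp only [hm, Option.getD_some]
    have hle : ∀ row ∈ rows, (row.length : Int) ≤ m := by
      intro r hr
      simpa using PySem.List.max?_isMax hm ((r.length : Int)) (List.mem_map_of_mem hr)
    -- the empty-column set is a filter of range(m)
    rw [show (PySem.Set.empty : PySem.Set Int) = ([] : List Int) from rfl]
    rw [foldl_add_filter _ _ [] (PySem.List.nodup_pyRange_one 0 m) (by simp)]
    rw [List.nil_append]
    by_cases hE :
        (PySem.List.pyRange 0 m 1).filter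
          (fun col => (rows.map (fun row => pvPad row m)).all
            (fun row => PySem.Str.strip (PySem.List.pyGetD row col "") == "")) = []
    · rw [if_neg (by simpa using hE)]
      have hQ : ∀ i ∈ PySem.List.pyRange 0 m 1,
          (rows.any (fun row =>
            if i < (row.length : Int) then !(PySem.Str.strip (PySem.List.pyGetD row i "") == "") else false)) = true := by
        intro i hi
        obtain ⟨hi0, hi1⟩ := PySem.List.mem_pyRange_one.mp hi
        have hnp := List.filter_eq_nil_iff.mp hE i hi
        have := cell_test rows m i hle hi0 hi1
        simp only [this] at hnp
        simpa using hnp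
      rw [List.filter_eq_self.mpr hQ]
      apply List.map_congr_left
      intro row hr
      exact pvPad_eq_map row m (hle row hr)
    · rw [if_pos (by simpa using hE), List.map_map]
      apply List.map_congr_left
      intro row hr
      simp only [Function.comp_apply]
      rw [PySem.List.enumerate_eq_map_pyRange (d := "")]
      rw [PySem.List.len_eq, length_pvPad row m (hle row hr)]
      rw [List.filter_map, List.map_map]
      have hfc : ∀ j ∈ PySem.List.pyRange 0 m 1,
          ((fun p => !(PySem.Set.contains
              ((PySem.List.pyRange 0 m 1).filter
                (fun col => (rows.map (fun row => pvPad row m)).all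
                  (fun row => PySem.Str.strip (PySem.List.pyGetD row col "") == ""))) p.1)) ∘
            (fun j => (j, PySem.List.pyGetD (pvPad row m) j ""))) j
          = (fun i => rows.any (fun row =>
              if i < (row.length : Int) then !(PySem.Str.strip (PySem.List.pyGetD row i "") == "") else false)) j := by
        intro j hj
        obtain ⟨hj0, hj1⟩ := PySem.List.mem_pyRange_one.mp hj
        have hct := cell_test rows m j hle hj0 hj1
        simp only [Function.comp_apply, PySem.Set.contains_eq_listContains]
        have hca : (((PySem.List.pyRange 0 m 1).filter
              (fun col => (rows.map (fun row => pvPad row m)).all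
                (fun row => PySem.Str.strip (PySem.List.pyGetD row col "") == ""))).contains j)
            = ((rows.map (fun row => pvPad row m)).all
                (fun row => PySem.Str.strip (PySem.List.pyGetD row j "") == "")) := by
          by_cases hpj : ((rows.map (fun row => pvPad row m)).all
              (fun row => PySem.Str.strip (PySem.List.pyGetD row j "") == "")) = true
          · rw [hpj]
            exact List.contains_iff_mem.mpr (List.mem_filter.mpr ⟨hj, hpj⟩)
          · have hnm : j ∉ (PySem.List.pyRange 0 m 1).filter
                (fun col => (rows.map (fun row => pvPad row m)).all
                  (fun row => PySem.Str.strip (PySem.List.pyGetD row col "") == "")) :=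
              fun hmem => hpj (List.mem_filter.mp hmem).2
            rw [Bool.eq_false_iff.mpr hpj]
            cases hcv : (((PySem.List.pyRange 0 m 1).filter
                (fun col => (rows.map (fun row => pvPad row m)).all
                  (fun row => PySem.Str.strip (PySem.List.pyGetD row col "") == ""))).contains j) with
            | false => rfl
            | true => exact absurd (List.contains_iff_mem.mp hcv) hnm
        rw [hca, hct]
        simp
      rw [List.filter_congr hfc]
      apply List.map_congr_left
      intro j hj
      obtain ⟨hj0, hj1⟩ := PySem.List.mem_pyRange_one.mp (List.mem_of_mem_filter hj)
      simp only [Function.comp_apply]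
      exact pyGetD_pvPad row m j (hle row hr) hj0 hj1

-- zip(*(c :: cs)) on columns of a common length n, in closed form
theorem pvZipGo_uniform (n : Nat) :
    ∀ (c : List String) (cs : List (List String)), c.length = n → (∀ l ∈ cs, l.length = n) →
      pvZipGo c cs = (List.range n).map (fun j => (c :: cs).map (fun l => l.getD j "")) := by
  induction n with
  | zero =>
    intro c cs hc _
    rw [List.length_eq_zero_iff.mp hc]
    simp [pvZipGo]
  | succ n ih =>
    intro c cs hc hcs
    obtain ⟨x, xs, rfl⟩ : ∃ x xs, c = x :: xs := by
      cases c with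
      | nil => simp at hc
      | cons x xs => exact ⟨x, xs, rfl⟩
    rw [pvZipGo]
    have hne : (cs.any (fun l => l.isEmpty)) = false := by
      rw [List.any_eq_false]
      intro l hl
      have := hcs l hl
      cases l with
      | nil => simp at this
      | cons a t => simp [List.isEmpty]
    rw [hne]
    simp only [Bool.false_eq_true, if_false]
    rw [ih xs (cs.map List.tail) (by simpa using hc)
      (by intro l hl
          obtain ⟨l', hl', rfl⟩ := List.mem_map.mp hl
          have := hcs l' hl'
          cases l' with
          | nil => simp at this
          | cons a t => simpa using this)]
    rw [List.range_succ_eq_map, List.map_cons, List.map_map]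
    congr 1
    · -- the j = 0 column tuple
      simp only [List.map_cons, List.getD_cons_zero]
      congr 1
      apply List.map_congr_left
      intro l hl
      have := hcs l hl
      cases l with
      | nil => simp at this
      | cons a t => simp
    · -- the j ≥ 1 column tuples
      apply List.map_congr_left
      intro j _
      simp only [Function.comp_apply, List.map_cons, List.getD_cons_succ, List.map_map]
      congr 1
      apply List.map_congr_left
      intro l hl
      have := hcs l hl
      cases l with
      | nil => simp at this
      | cons a t => simp

-- B equals the index form
theorem B_eq_idx (rows : List (List String)) : normalize_table_rows_alt rows = pvIdxForm rows := by
  unfold normalize_table_rows_alt pvIdxForm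
  by_cases h : rows = []
  · simp [h]
  · rw [if_neg h, if_neg h]
    set m : Int := (PySem.List.max? (rows.map (fun r => (r.length : Int))) (fun x => x)).getD 0 with hm
    -- filtered columns = columns at the kept indices
    have hcellstrip : ∀ (row : List String) (i : Int),
        (!(PySem.Str.strip (pvCell row i) == "")) =
          (if i < (row.length : Int) then !(PySem.Str.strip (PySem.List.pyGetD row i "") == "") else false) := by
      intro row i
      unfold pvCell
      split_ifs with hlt
      · rfl
      · decide
    have hfilter :
        ((PySem.List.pyRange 0 m 1).map
            (fun i => rows.map (fun row => pvCell row i))).filter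
          (fun c => c.any (fun cell => !(PySem.Str.strip cell == "")))
        = ((PySem.List.pyRange 0 m 1).filter
            (fun i => rows.any (fun row =>
              if i < (row.length : Int) then !(PySem.Str.strip (PySem.List.pyGetD row i "") == "") else false))).map
            (fun i => rows.map (fun row => pvCell row i)) := by
      rw [List.filter_map]
      congr 1
      apply List.filter_congr
      intro i _
      simp only [Function.comp_apply, List.any_map]
      apply any_congr'
      intro row _
      exact hcellstrip row i
    simp only [pvCell] at hfilter ⊢
    rw [hfilter]
    set keep := (PySem.List.pyRange 0 m 1).filter
      (fun i => rows.any (fun row =>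
        if i < (row.length : Int) then !(PySem.Str.strip (PySem.List.pyGetD row i "") == "") else false)) with hkeep
    cases hk : keep with
    | nil => simp
    | cons i0 is =>
      simp only [List.map_cons]
      have hcollen : ∀ i : Int, (rows.map (fun row =>
          if i < (row.length : Int) then PySem.List.pyGetD row i "" else "")).length = rows.length := by
        intro i; simp
      rw [pvZipGo_uniform rows.length _ _ (hcollen i0)
        (by intro l hl
            obtain ⟨i, _, rfl⟩ := List.mem_map.mp hl
            exact hcollen i)]
    -- row j of the zipped result = keep indexed into row j
      rw [show ((rows.map (fun row =>
            if i0 < (row.length : Int) then PySem.List.pyGetD row i0 "" else "")) ::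
          is.map (fun i => rows.map (fun row =>
            if i < (row.length : Int) then PySem.List.pyGetD row i "" else "")))
        = (i0 :: is).map (fun i => rows.map (fun row =>
            if i < (row.length : Int) then PySem.List.pyGetD row i "" else "")) from by simp]
      apply List.ext_getElem
      · simp
      · intro j hj1 hj2
        have hjr : j < rows.length := by simpa using hj2
        have hone : ∀ i : Int,
            (rows.map (fun row =>
              if i < (row.length : Int) then PySem.List.pyGetD row i "" else "")).getD j ""
            = (if i < ((rows[j]).length : Int) then PySem.List.pyGetD rows[j] i "" else "") := by
          intro i
          rw [List.getD_eq_getElem _ "" (by simpa using hjr), List.getElem_map]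
        simp only [List.getElem_map, List.getElem_range, List.map_map, List.map_cons]
        rw [hone i0]
        congr 1
        apply List.map_congr_left
        intro i _
        simp only [Function.comp_apply]
        exact hone i

-- ===== VERDICT (by name: the statement is the Claim_ definition above) =====
theorem normalize_table_rows_spec : Claim_equal_normalize_table_rows := by
  unfold Claim_equal_normalize_table_rows
  intro rows _
  unfold Spec_normalize_table_rows
  rw [A_eq_idx, B_eq_idx]
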